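-- pv_equiv track=rewrite | github.com/rojasraleena-svg/ClawArcade | 101-CIFAR/train.py | eval_epoch_schedule
-- ===== SOURCE A (Python) =====
-- def eval_epoch_schedule(total_epochs: int) -> list[int]:
--     """
--     Increasingly dense test-set checkpoints: every 10 early, every 5 from 25,
--     then every epoch in the last 5 (matches e.g. 40 -> 1,10,20,25,30,35,36..40).
--     """
--     if total_epochs < 1:
--         return []
--     check: set[int] = {1, total_epochs}
--     tail = min(5, total_epochs)
--     dense_from = total_epochs - tail + 1
--     for e in range(10, total_epochs, 10):
--         if e < dense_from:
--             check.add(e)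
--     for e in range(25, dense_from, 5):
--         if 1 <= e <= total_epochs:
--             check.add(e)
--     for e in range(dense_from, total_epochs + 1):
--         check.add(e)
--     return sorted(check)
-- ===== SOURCE B (Python) =====
-- def eval_epoch_schedule(total_epochs: int) -> list[int]:
--     if total_epochs < 1:
--         return []
--     tail = min(5, total_epochs)
--     dense_from = total_epochs - tail + 1
--     result = []
--     for e in range(1, total_epochs + 1):
--         if e == 1 or e >= dense_from or (e % 10 == 0 and e < dense_from) or (e % 5 == 0 and e >= 25 and e < dense_from):
--             result.append(e)
--     return result
-- ===== Notes on version B (the rewrite author's own statement) =====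
-- stated objective: simpler
-- what changed: Replaces A's four separate range loops into a set followed by dedup and a final sort with a single increasing pass over range(1, total_epochs+1) that appends each epoch matching the checkpoint condition, so no set and no sort are needed.
import Mathlib
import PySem

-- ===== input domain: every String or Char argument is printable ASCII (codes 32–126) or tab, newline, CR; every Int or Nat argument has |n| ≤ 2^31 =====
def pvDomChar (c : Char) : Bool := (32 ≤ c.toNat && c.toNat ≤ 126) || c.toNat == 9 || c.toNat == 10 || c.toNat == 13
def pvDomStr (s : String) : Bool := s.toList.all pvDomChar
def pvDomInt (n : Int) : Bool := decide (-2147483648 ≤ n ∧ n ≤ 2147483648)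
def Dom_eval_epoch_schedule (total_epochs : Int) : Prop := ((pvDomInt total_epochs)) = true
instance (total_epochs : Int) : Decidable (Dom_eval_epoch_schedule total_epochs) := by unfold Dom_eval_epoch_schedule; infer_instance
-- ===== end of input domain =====

-- B replaces A's four range loops + set dedup + final sort by one ordered filtering
-- pass over range(1, total_epochs + 1); objective: simpler.

-- ===== PORT A =====
def eval_epoch_schedule (total_epochs : Int) : List Int :=
  if total_epochs < 1 then []
  else
    let check : PySem.Set Int := PySem.Set.ofList [1, total_epochs]
    let tail : Int := min 5 total_epochs
    let dense_from : Int := total_epochs - tail + 1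
    let check := (PySem.List.pyRange 10 total_epochs 10).foldl
      (fun s e => if e < dense_from then PySem.Set.add s e else s) check
    let check := (PySem.List.pyRange 25 dense_from 5).foldl
      (fun s e => if 1 ≤ e ∧ e ≤ total_epochs then PySem.Set.add s e else s) check
    let check := (PySem.List.pyRange dense_from (total_epochs + 1) 1).foldl
      (fun s e => PySem.Set.add s e) check
    PySem.List.sorted check (fun x => x)

-- ===== PORT B =====
def eval_epoch_schedule_alt (total_epochs : Int) : List Int :=
  if total_epochs < 1 then []
  else
    let tail : Int := min 5 total_epochs
    let dense_from : Int := total_epochs - tail + 1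
    (PySem.List.pyRange 1 (total_epochs + 1) 1).foldl
      (fun acc e =>
        if e = 1 ∨ e ≥ dense_from ∨ (PySem.Int.mod e 10 = 0 ∧ e < dense_from) ∨
            (PySem.Int.mod e 5 = 0 ∧ e ≥ 25 ∧ e < dense_from)
        then acc ++ [e] else acc) []

-- ===== PRECONDITION & SPEC =====
def Spec_eval_epoch_schedule (total_epochs : Int) (out : List Int) : Prop := out = eval_epoch_schedule_alt total_epochs
instance (total_epochs : Int) (out : List Int) : Decidable (Spec_eval_epoch_schedule total_epochs out) := by unfold Spec_eval_epoch_schedule; infer_instance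

-- ===== CLAIM (what is proved, stated in full; the proofs are below) =====
def Claim_equal_eval_epoch_schedule : Prop := ∀ (total_epochs : Int), Dom_eval_epoch_schedule total_epochs → Spec_eval_epoch_schedule total_epochs (eval_epoch_schedule total_epochs)

-- ===== LEMMAS AND PROOFS =====

-- membership after a loop that conditionally adds the loop variable to a set
theorem mem_foldl_setAddIf (p : Int → Prop) [DecidablePred p] (l : List Int)
    (s : PySem.Set Int) (x : Int) :
    x ∈ l.foldl (fun s e => if p e then PySem.Set.add s e else s) s ↔
      x ∈ s ∨ (x ∈ l ∧ p x) := by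
  induction l generalizing s with
  | nil => simp
  | cons a t ih =>
    simp only [List.foldl_cons, ih, List.mem_cons]
    split_ifs with hp
    · rw [PySem.Set.mem_add]
      constructor
      · rintro (⟨h | h⟩ | h)
        · exact Or.inl h
        · exact Or.inr ⟨Or.inl h, by rwa [h]⟩
        · exact Or.inr ⟨Or.inr h.1, h.2⟩
      · rintro (h | ⟨h | h, hpx⟩)
        · exact Or.inl (Or.inl h)
        · exact Or.inl (Or.inr h)
        · exact Or.inr ⟨h, hpx⟩
    · constructor
      · rintro (h | h)
        · exact Or.inl h
        · exact Or.inr ⟨Or.inr h.1, h.2⟩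
      · rintro (h | ⟨h | h, hpx⟩)
        · exact Or.inl h
        · exact absurd (by rwa [h] at hpx) hp
        · exact Or.inr ⟨h, hpx⟩

-- membership after a loop that unconditionally adds the loop variable to a set
theorem mem_foldl_setAdd (l : List Int) (s : PySem.Set Int) (x : Int) :
    x ∈ l.foldl (fun s e => PySem.Set.add s e) s ↔ x ∈ s ∨ x ∈ l := by
  induction l generalizing s with
  | nil => simp
  | cons a t ih => simp [ih, PySem.Set.mem_add]; tauto

-- nodup is preserved by both loop shapes
theorem nodup_foldl_setAddIf (p : Int → Prop) [DecidablePred p] (l : List Int)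
    (s : PySem.Set Int) (hs : s.Nodup) :
    (l.foldl (fun s e => if p e then PySem.Set.add s e else s) s).Nodup := by
  induction l generalizing s with
  | nil => exact hs
  | cons a t ih =>
    simp only [List.foldl_cons]
    split_ifs with hp
    · exact ih _ (PySem.Set.nodup_add s a hs)
    · exact ih _ hs

theorem nodup_foldl_setAdd (l : List Int) (s : PySem.Set Int) (hs : s.Nodup) :
    (l.foldl (fun s e => PySem.Set.add s e) s).Nodup := by
  induction l generalizing s with
  | nil => exact hs
  | cons a t ih => exact ih _ (PySem.Set.nodup_add s a hs)

-- ===== VERDICT (by name: the statement is the Claim_ definition above) =====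
theorem eval_epoch_schedule_spec : Claim_equal_eval_epoch_schedule := by
  intro n _
  show eval_epoch_schedule n = eval_epoch_schedule_alt n
  unfold eval_epoch_schedule eval_epoch_schedule_alt
  by_cases hn : n < 1
  · rw [if_pos hn, if_pos hn]
  · rw [if_neg hn, if_neg hn]
    rw [Int.not_lt] at hn
    set d : Int := n - min 5 n + 1 with hd
    have hd1 : 1 ≤ d := by omega
    have hdn : d ≤ n := by omega
    rw [PySem.List.foldl_append_ite_eq_filter, List.nil_append]
    have hrangeNodup : (PySem.List.pyRange 1 (n + 1) 1).Nodup := by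
      rw [PySem.List.pyRange_of_pos 1 (n + 1) (by omega)]
      exact List.nodup_range.map (fun a b h => by omega)
    apply PySem.List.sorted_eq_of_perm_of_pairwise_lt
    · -- B's filtered range is a permutation of A's final set
      apply List.perm_of_nodup_nodup_toFinset_eq
      · exact List.Nodup.filter _ hrangeNodup
      · exact nodup_foldl_setAdd _ _
          (nodup_foldl_setAddIf _ _ _
            (nodup_foldl_setAddIf _ _ _ (PySem.Set.nodup_ofList [1, n])))
      · ext x
        simp only [List.mem_toFinset, List.mem_filter,
          mem_foldl_setAdd, mem_foldl_setAddIf, PySem.Set.mem_ofList,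
          PySem.List.mem_pyRange_iff_of_pos (by omega : (0:Int) < 1),
          PySem.List.mem_pyRange_iff_of_pos (by omega : (0:Int) < 5),
          PySem.List.mem_pyRange_iff_of_pos (by omega : (0:Int) < 10),
          List.mem_cons, decide_eq_true_eq,
          PySem.Int.mod_eq_zero_iff_dvd, List.not_mem_nil, or_false]
        omega
    · -- B's list is strictly increasing
      apply List.Pairwise.filter
      rw [PySem.List.pyRange_of_pos 1 (n + 1) (by omega)]
      exact (List.pairwise_lt_range).map _ (fun a b h => by omega)
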